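-- pv_equiv track=rewrite | github.com/bm20050/ai-programming | localSearch/TSP_Visualizer_v0.9/algoritms/ApproxMST.py | get_list_of_indices
-- ===== SOURCE A (Python) =====
-- def get_list_of_indices(l):
--     listOfIndices = []
--     for i in range(len(l) + 1):
--         indices = []
--         for j in range(len(l)):
--             if i == l[j]:
--                 indices.append(j + 1)
--         listOfIndices.append(indices)
--     return listOfIndices
-- ===== SOURCE B (Python) =====
-- def get_list_of_indices(l):
--     n = len(l)
--     buckets = [[] for _ in range(n + 1)]
--     for j, v in enumerate(l):
--         if 0 <= v <= n:
--             buckets[v].append(j + 1)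
--     return buckets
-- ===== Notes on version B (the rewrite author's own statement) =====
-- stated objective: faster
-- what changed: Replaces the nested scan (for each value 0..n rescan the whole list) with single-pass bucketing: one pass over the list appending each 1-based position into the bucket indexed by its value.
import Mathlib
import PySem

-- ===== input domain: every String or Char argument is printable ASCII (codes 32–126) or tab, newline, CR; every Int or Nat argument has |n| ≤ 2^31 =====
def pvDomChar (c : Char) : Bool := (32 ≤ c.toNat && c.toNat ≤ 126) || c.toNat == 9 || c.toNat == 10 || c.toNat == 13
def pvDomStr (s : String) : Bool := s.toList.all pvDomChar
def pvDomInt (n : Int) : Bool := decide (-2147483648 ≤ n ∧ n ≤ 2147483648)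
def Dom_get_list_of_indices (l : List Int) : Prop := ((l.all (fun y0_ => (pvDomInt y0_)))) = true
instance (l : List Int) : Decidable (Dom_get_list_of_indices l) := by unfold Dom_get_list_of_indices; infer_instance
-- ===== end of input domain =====

-- B replaces A's nested scan (rescan the list for every value 0..n) with one bucketing pass.

-- ===== PORT A =====
-- literal port: for i in range(len(l)+1): rescan l, collecting j+1 where i == l[j]
def get_list_of_indices (l : List Int) : List (List Int) :=
  (PySem.List.pyRange 0 ((l.length : Int) + 1) 1).foldl
    (fun listOfIndices i =>
      listOfIndices ++
        [(PySem.List.pyRange 0 (l.length : Int) 1).foldl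
          (fun indices j =>
            if i = PySem.List.pyGetD l j 0 then indices ++ [j + 1] else indices)
          []])
    []

-- ===== PORT B =====
-- literal port of Source B: buckets = [[] for _ in range(n+1)] (n = len(l)); single pass
-- over enumerate(l) appending j+1 into buckets[v] when 0 <= v <= n
def get_list_of_indices_alt (l : List Int) : List (List Int) :=
  (PySem.List.enumerate l 0).foldl
    (fun buckets p =>
      if 0 ≤ p.2 ∧ p.2 ≤ (l.length : Int) then
        buckets.set p.2.toNat ((buckets.getD p.2.toNat []) ++ [p.1 + 1])
      else buckets)
    (List.replicate (l.length + 1) [])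

-- ===== PRECONDITION & SPEC =====
def Spec_get_list_of_indices (l : List Int) (out : List (List Int)) : Prop := out = get_list_of_indices_alt l
instance (l : List Int) (out : List (List Int)) : Decidable (Spec_get_list_of_indices l out) := by unfold Spec_get_list_of_indices; infer_instance

-- ===== CLAIM (what is proved, stated in full; the proofs are below) =====
def Claim_equal_get_list_of_indices : Prop := ∀ (l : List Int), Dom_get_list_of_indices l → Spec_get_list_of_indices l (get_list_of_indices l)

-- ===== LEMMAS AND PROOFS =====

-- getD after set, as an if (no such lemma in Mathlib/PySem)
theorem pvGetD_set (b : List (List Int)) (i v : Nat) (a : List Int) :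
    (b.set i a).getD v [] = if i = v ∧ i < b.length then a else b.getD v [] := by
  simp only [List.getD_eq_getElem?_getD, List.getElem?_set]
  by_cases h1 : i = v
  · subst h1
    by_cases h2 : i < b.length
    · simp [h2]
    · simp [h2]
  · simp [h1]

-- positions (numbered from k) of value i in a list
def pvCollect (i k : Int) : List Int → List Int
  | [] => []
  | x :: xs => (if x = i then [k] else []) ++ pvCollect i (k + 1) xs

-- A's inner loop from index a computes pvCollect on the suffix
theorem pvInnerA (l : List Int) (i : Int) :
    ∀ (m a : Nat), a + m = l.length → ∀ acc : List Int,
      (PySem.List.pyRange (a : Int) (l.length : Int) 1).foldl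
        (fun indices j => if i = PySem.List.pyGetD l j 0 then indices ++ [j + 1] else indices) acc
      = acc ++ pvCollect i ((a : Int) + 1) (l.drop a) := by
  intro m
  induction m with
  | zero =>
    intro a ha acc
    have h0 : a = l.length := by omega
    subst h0
    rw [PySem.List.pyRange_one_eq_nil (le_refl _)]
    simp [pvCollect]
  | succ m ih =>
    intro a ha acc
    have hlt : a < l.length := by omega
    rw [PySem.List.pyRange_one_cons (by exact_mod_cast hlt)]
    have hget : PySem.List.pyGetD l (a : Int) 0 = l[a] := by
      simp [PySem.List.pyGetD_natCast, List.getD_eq_getElem?_getD, List.getElem?_eq_getElem hlt]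
    have hcast : (a : Int) + 1 = ((a + 1 : Nat) : Int) := by push_cast; ring
    have hdrop : l.drop a = l[a] :: l.drop (a + 1) := List.drop_eq_getElem_cons hlt
    simp only [List.foldl_cons, hget]
    rw [hcast, ih (a + 1) (by omega), hdrop]
    rw [← hcast]
    simp only [pvCollect]
    by_cases hx : l[a] = i
    · rw [if_pos hx.symm, if_pos hx]
      simp [List.append_assoc]
    · rw [if_neg (fun h => hx h.symm), if_neg hx]
      simp

-- B's fold: bucket v of the result is bucket v of the start plus pvCollect
theorem pvInnerB (n : Nat) :
    ∀ (xs : List Int) (k : Int) (b : List (List Int)), b.length = n + 1 →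
      (((PySem.List.enumerate xs k).foldl
          (fun buckets p =>
            if 0 ≤ p.2 ∧ p.2 ≤ (n : Int) then
              buckets.set p.2.toNat ((buckets.getD p.2.toNat []) ++ [p.1 + 1])
            else buckets) b).length = n + 1
       ∧ ∀ v : Nat, v < n + 1 →
          ((PySem.List.enumerate xs k).foldl
            (fun buckets p =>
              if 0 ≤ p.2 ∧ p.2 ≤ (n : Int) then
                buckets.set p.2.toNat ((buckets.getD p.2.toNat []) ++ [p.1 + 1])
              else buckets) b).getD v []
          = b.getD v [] ++ pvCollect (v : Int) (k + 1) xs) := by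
  intro xs
  induction xs with
  | nil =>
    intro k b hb
    simp [PySem.List.enumerate_nil, pvCollect, hb]
  | cons x xs ih =>
    intro k b hb
    rw [PySem.List.enumerate_cons]
    simp only [List.foldl_cons]
    by_cases hx : 0 ≤ x ∧ x ≤ (n : Int)
    · rw [if_pos hx]
      have hxt : x.toNat < b.length := by omega
      have hb' : (b.set x.toNat ((b.getD x.toNat []) ++ [k + 1])).length = n + 1 := by
        simp [hb]
      obtain ⟨hl, hv⟩ := ih (k + 1) _ hb'
      refine ⟨hl, ?_⟩
      intro v hvlt
      rw [hv v hvlt, pvGetD_set]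
      by_cases hvx : x.toNat = v
      · have hxe : x = (v : Int) := by omega
        have hvb : v < b.length := hvx ▸ hxt
        simp [hvb, pvCollect, hxe]
      · have hxe : ¬ x = (v : Int) := by omega
        simp [hvx, pvCollect, hxe]
    · rw [if_neg hx]
      obtain ⟨hl, hv⟩ := ih (k + 1) b hb
      refine ⟨hl, ?_⟩
      intro v hvlt
      rw [hv v hvlt]
      have hxe : ¬ x = (v : Int) := by omega
      simp [pvCollect, hxe]

theorem pvA_eq_map (l : List Int) :
    get_list_of_indices l
      = (List.range (l.length + 1)).map (fun v : Nat => pvCollect (v : Int) 1 l) := by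
  unfold get_list_of_indices
  rw [PySem.List.foldl_append_singleton_eq_map]
  rw [PySem.List.pyRange_one 0 ((l.length : Int) + 1)]
  have h1 : (((l.length : Int) + 1) - 0).toNat = l.length + 1 := by omega
  rw [h1, List.map_map, List.nil_append]
  apply List.map_congr_left
  intro v _
  have := pvInnerA l (0 + (v : Int)) l.length 0 (by omega) []
  simpa using this

-- ===== VERDICT (by name: the statement is the Claim_ definition above) =====
theorem get_list_of_indices_spec : Claim_equal_get_list_of_indices := by
  intro l _
  show get_list_of_indices l = get_list_of_indices_alt l
  rw [pvA_eq_map]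
  unfold get_list_of_indices_alt
  obtain ⟨hl, hv⟩ := pvInnerB l.length l 0 (List.replicate (l.length + 1) []) (by simp)
  apply List.ext_getElem
  · simpa using hl.symm
  · intro v h1 h2
    have hvlt : v < l.length + 1 := by simpa using h1
    have hB := hv v hvlt
    rw [List.getD_eq_getElem _ _ h2] at hB
    rw [List.getElem_map, List.getElem_range, hB]
    simp [List.getD_eq_getElem?_getD, hvlt]
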